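-- pv_equiv track=rewrite | github.com/tvlad245-boop/recording_studio_bot_v2 | database/db.py | slots_selection_is_contiguous_block
-- ===== SOURCE A (Python) =====
-- from typing import Any
--
-- def slots_selection_is_contiguous_block(
--     all_slots_chronological: list[dict[str, Any]],
--     selected_ids: set[int],
-- ) -> bool:
--     """
--     Выбранные слоты — один непрерывный блок в сетке дня (соседние строки расписания).
--     Надёжнее сравнения строк времени (нет расхождений 9:00/09:00, «00:00» и т.д.).
--     """
--     if not selected_ids:
--         return False
--     sel = {int(x) for x in selected_ids}
--     indices = [i for i, s in enumerate(all_slots_chronological) if int(s["id"]) in sel]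
--     if len(indices) != len(sel):
--         return False
--     indices.sort()
--     for j in range(len(indices) - 1):
--         if indices[j + 1] != indices[j] + 1:
--             return False
--     return True
-- ===== SOURCE B (Python) =====
-- def slots_selection_is_contiguous_block(
--     all_slots_chronological,
--     selected_ids,
-- ):
--     # Map the day grid to a boolean "selected" mask, then check the mask is
--     # (optional gap) + one run of True + (no further True), the run covering sel.
--     if not selected_ids:
--         return False
--     sel = {int(x) for x in selected_ids}
--     flags = [int(s["id"]) in sel for s in all_slots_chronological]
--     i = 0
--     while i < len(flags) and not flags[i]:
--         i += 1                      # skip slots before the block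
--     j = i
--     while j < len(flags) and flags[j]:
--         j += 1                      # consume the run of selected slots
--     return j - i == len(sel) and not any(flags[j:])
-- ===== Notes on version B (the rewrite author's own statement) =====
-- stated objective: simpler
-- what changed: B never materialises indices: it builds a boolean 'selected' mask over the day grid and checks its shape directly (skip the False prefix, consume one True run whose length is len(sel), require no True afterwards), instead of A's collect-indices, sort and pairwise-adjacency scan.
-- outside the precondition, e.g. on slots_selection_is_contiguous_block([{'x': 1}], {1}): A raises KeyError, B raises KeyError
import Mathlib
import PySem

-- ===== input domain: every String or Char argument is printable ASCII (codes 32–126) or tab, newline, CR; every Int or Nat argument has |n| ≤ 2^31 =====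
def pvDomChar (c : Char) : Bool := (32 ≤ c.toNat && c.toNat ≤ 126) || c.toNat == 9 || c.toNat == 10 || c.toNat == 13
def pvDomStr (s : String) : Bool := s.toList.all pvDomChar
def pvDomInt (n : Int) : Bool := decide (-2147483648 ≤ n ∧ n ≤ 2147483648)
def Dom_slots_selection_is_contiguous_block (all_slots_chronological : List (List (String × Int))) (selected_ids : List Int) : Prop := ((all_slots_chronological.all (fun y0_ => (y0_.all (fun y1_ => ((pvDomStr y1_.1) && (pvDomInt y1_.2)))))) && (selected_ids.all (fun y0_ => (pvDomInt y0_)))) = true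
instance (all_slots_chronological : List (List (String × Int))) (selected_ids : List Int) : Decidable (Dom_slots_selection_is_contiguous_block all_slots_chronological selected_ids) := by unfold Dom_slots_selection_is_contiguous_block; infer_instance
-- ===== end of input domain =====

-- B replaces A's collect-indices + sort + pairwise-adjacency scan by a boolean
-- "selected" mask over the grid, checked to be: gap, then one run covering sel,
-- then no further selected slot (simpler: no index list is materialised).

-- ===== PORT A =====
def slots_selection_is_contiguous_block (all_slots_chronological : List (List (String × Int))) (selected_ids : List Int) : Bool :=
  if selected_ids.isEmpty then false
  else
    -- sel = {int(x) for x in selected_ids}; int() is the identity on Int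
    let sel : PySem.Set Int := PySem.Set.ofList selected_ids
    -- indices = [i for i, s in enumerate(all_slots_chronological) if int(s["id"]) in sel]
    -- s["id"] is a first-match dict lookup; the KeyError case (no "id" key) is excluded by Pre_, default 0 is never read there
    let indices : List Int :=
      ((PySem.List.enumerate all_slots_chronological 0).filter
        (fun p => PySem.Set.contains sel ((p.2.lookup "id").getD 0))).map Prod.fst
    if PySem.List.len indices != PySem.Set.len sel then false
    else
      let srt := PySem.List.sorted indices (fun x => x)
      (PySem.List.pyRange 0 (PySem.List.len srt - 1)).all
        (fun j => PySem.List.pyGetD srt (j + 1) 0 == PySem.List.pyGetD srt j 0 + 1)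

-- ===== PORT B =====
def slots_selection_is_contiguous_block_alt (all_slots_chronological : List (List (String × Int))) (selected_ids : List Int) : Bool :=
  if selected_ids.isEmpty then false
  else
    let sel : PySem.Set Int := PySem.Set.ofList selected_ids
    -- flags = [int(s["id"]) in sel for s in all_slots_chronological]; same "id" lookup remark as in port A
    let flags : List Bool :=
      all_slots_chronological.map (fun s => PySem.Set.contains sel ((s.lookup "id").getD 0))
    -- the two index-advancing while loops: skip the unselected prefix, then consume the selected run
    let t := flags.dropWhile (fun b => !b)
    let run := t.takeWhile (fun b => b)
    let rest := t.dropWhile (fun b => b)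
    -- j - i == len(sel) and not any(flags[j:])
    (PySem.List.len run == PySem.Set.len sel) && !(rest.any (fun b => b))

-- ===== PRECONDITION & SPEC =====
-- Pre_ excludes only inputs on which A raises KeyError: a nonempty selection with some slot lacking an "id" key.
def Pre_slots_selection_is_contiguous_block (all_slots_chronological : List (List (String × Int))) (selected_ids : List Int) : Prop :=
  (selected_ids.isEmpty || all_slots_chronological.all (fun s => s.any (fun p => p.1 == "id"))) = true
instance (all_slots_chronological : List (List (String × Int))) (selected_ids : List Int) : Decidable (Pre_slots_selection_is_contiguous_block all_slots_chronological selected_ids) := by unfold Pre_slots_selection_is_contiguous_block; infer_instance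
def pvWitness_slots_selection_is_contiguous_block : (List (List (String × Int))) × List Int :=
  ([[("id", 1)], [("id", 2)], [("id", 3)]], [2, 3])

def Spec_slots_selection_is_contiguous_block (all_slots_chronological : List (List (String × Int))) (selected_ids : List Int) (out : Bool) : Prop := out = slots_selection_is_contiguous_block_alt all_slots_chronological selected_ids
instance (all_slots_chronological : List (List (String × Int))) (selected_ids : List Int) (out : Bool) : Decidable (Spec_slots_selection_is_contiguous_block all_slots_chronological selected_ids out) := by unfold Spec_slots_selection_is_contiguous_block; infer_instance

-- ===== CLAIM (what is proved, stated in full; the proofs are below) =====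
def Claim_equal_slots_selection_is_contiguous_block : Prop := ∀ (all_slots_chronological : List (List (String × Int))) (selected_ids : List Int), Dom_slots_selection_is_contiguous_block all_slots_chronological selected_ids → Pre_slots_selection_is_contiguous_block all_slots_chronological selected_ids → Spec_slots_selection_is_contiguous_block all_slots_chronological selected_ids (slots_selection_is_contiguous_block all_slots_chronological selected_ids)

-- ===== LEMMAS AND PROOFS =====

-- proof-only helper: positions (starting at n) of the true entries of a mask
def posTrue : List Bool → Int → List Int
  | [], _ => []
  | b :: t, n => if b then n :: posTrue t (n + 1) else posTrue t (n + 1)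

-- proof-only helper: the tail ys follows x in unit steps
def AdjChain : Int → List Int → Prop
  | _, [] => True
  | x, y :: t => y = x + 1 ∧ AdjChain y t

-- Chain0 xs: xs is a block of consecutive integers
def Chain0 : List Int → Prop
  | [] => True
  | x :: ys => AdjChain x ys

lemma posTrue_spec (sel : PySem.Set Int) : ∀ (l : List (List (String × Int))) (n : Int),
    ((PySem.List.enumerate l n).filter
        (fun p => PySem.Set.contains sel ((p.2.lookup "id").getD 0))).map Prod.fst
      = posTrue (l.map (fun s => PySem.Set.contains sel ((s.lookup "id").getD 0))) n := by
  intro l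
  induction l with
  | nil => intro n; simp [PySem.List.enumerate_nil, posTrue]
  | cons a t ih =>
    intro n
    rw [PySem.List.enumerate_cons, List.map_cons]
    simp only [List.filter_cons, posTrue]
    by_cases h : PySem.Set.contains sel ((a.lookup "id").getD 0) = true
    · rw [if_pos h, if_pos h, List.map_cons, ih]
    · rw [if_neg h, if_neg h, ih]

lemma posTrue_head_ge : ∀ (bs : List Bool) (m x : Int) (ys : List Int),
    posTrue bs m = x :: ys → m ≤ x := by
  intro bs
  induction bs with
  | nil => intro m x ys h; simp [posTrue] at h
  | cons b t ih =>
    intro m x ys h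
    by_cases hb : b
    · simp [posTrue, hb] at h; omega
    · simp [posTrue, hb] at h
      have := ih (m + 1) x ys h
      omega

lemma posTrue_pairwise : ∀ (bs : List Bool) (n : Int), (posTrue bs n).Pairwise (· < ·) := by
  intro bs
  induction bs with
  | nil => intro n; simp [posTrue]
  | cons b t ih =>
    intro n
    by_cases hb : b
    · simp only [posTrue, hb, if_true]
      refine List.pairwise_cons.mpr ⟨?_, ih (n + 1)⟩
      intro x hx
      cases hp : posTrue t (n + 1) with
      | nil => rw [hp] at hx; simp at hx
      | cons y ys =>
        rw [hp] at hx
        have hy := posTrue_head_ge t (n + 1) y ys hp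
        have hpw := (ih (n + 1))
        rw [hp] at hpw
        rcases List.mem_cons.mp hx with h | h
        · omega
        · have := (List.pairwise_cons.mp hpw).1 x h
          omega
    · simpa [posTrue, hb] using ih (n + 1)

lemma posTrue_eq_nil : ∀ (bs : List Bool) (m : Int),
    posTrue bs m = [] ↔ bs.all (fun b => !b) = true := by
  intro bs
  induction bs with
  | nil => intro m; simp [posTrue]
  | cons b t ih =>
    intro m
    by_cases hb : b <;> simp [posTrue, hb, ih (m + 1)]

lemma posTrue_length : ∀ (bs : List Bool) (n : Int),
    (posTrue bs n).length = bs.countP (fun b => b) := by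
  intro bs
  induction bs with
  | nil => intro n; simp [posTrue]
  | cons b t ih =>
    intro n
    by_cases hb : b <;> simp [posTrue, hb, ih (n + 1)]

lemma countP_run_split (bs : List Bool) :
    bs.countP (fun b => b)
      = (bs.takeWhile (fun b => b)).length + (bs.dropWhile (fun b => b)).countP (fun b => b) := by
  conv_lhs => rw [← List.takeWhile_append_dropWhile (p := fun b => b) (l := bs)]
  rw [List.countP_append]
  congr 1
  rw [List.countP_eq_length]
  intro a ha
  exact List.mem_takeWhile_imp ha

lemma adjChain_run : ∀ (bs : List Bool) (n : Int),
    AdjChain n (posTrue bs (n + 1)) ↔ (bs.dropWhile (fun b => b)).all (fun b => !b) = true := by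
  intro bs
  induction bs with
  | nil => intro n; simp [posTrue, AdjChain]
  | cons b t ih =>
    intro n
    by_cases hb : b
    · simp only [posTrue, hb, if_true, List.dropWhile_cons]
      simp only [AdjChain, eq_self_iff_true, true_and]
      simpa using ih (n + 1)
    · have hb' : b = false := by simpa using hb
      subst hb'
      simp only [posTrue, if_false, List.dropWhile_cons, Bool.false_eq_true, List.all_cons,
        Bool.not_false, Bool.true_and]
      constructor
      · intro h
        by_contra hall
        have hne : posTrue t (n + 2) ≠ [] := by
          intro hnil
          exact hall ((posTrue_eq_nil t (n + 2)).mp hnil)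
        cases hp : posTrue t (n + 2) with
        | nil => exact hne hp
        | cons x ys =>
          have hge := posTrue_head_ge t (n + 2) x ys hp
          have h2 : posTrue t (n + 1 + 1) = x :: ys := by
            rw [show n + 1 + 1 = n + 2 by ring]; exact hp
          rw [h2] at h
          obtain ⟨h3, _⟩ := h
          omega
      · intro h
        have : posTrue t (n + 2) = [] := (posTrue_eq_nil t (n + 2)).mpr h
        rw [show n + 1 + 1 = n + 2 by ring, this]
        trivial

-- the core equivalence on boolean masks
lemma mask_main : ∀ (bs : List Bool) (n k : Int),
    ((((posTrue bs n).length : Int) = k) ∧ Chain0 (posTrue bs n)) ↔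
    (((((bs.dropWhile (fun b => !b)).takeWhile (fun b => b)).length : Int) = k)
      ∧ ((bs.dropWhile (fun b => !b)).dropWhile (fun b => b)).all (fun b => !b) = true) := by
  intro bs
  induction bs with
  | nil => intro n k; simp [posTrue, Chain0]
  | cons b t ih =>
    intro n k
    by_cases hb : b
    · have hb' : b = true := by simpa using hb
      subst hb'
      simp only [posTrue, if_true, List.dropWhile_cons, Bool.not_true, Bool.false_eq_true,
        if_false, List.takeWhile_cons, if_true, List.length_cons, Chain0]
      have hrun := adjChain_run t n
      constructor
      · rintro ⟨h1, h2⟩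
        have h3 := hrun.mp h2
        have h4 : (posTrue t (n + 1)).length = t.countP (fun b => b) := posTrue_length t (n + 1)
        have h5 := countP_run_split t
        have h6 : (t.dropWhile (fun b => b)).countP (fun b => b) = 0 := by
          rw [List.countP_eq_zero]
          intro a ha
          have := List.all_eq_true.mp h3 a ha
          simpa using this
        refine ⟨?_, h3⟩
        push_cast at h1 ⊢
        omega
      · rintro ⟨h1, h2⟩
        have h4 : (posTrue t (n + 1)).length = t.countP (fun b => b) := posTrue_length t (n + 1)
        have h5 := countP_run_split t
        have h6 : (t.dropWhile (fun b => b)).countP (fun b => b) = 0 := by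
          rw [List.countP_eq_zero]
          intro a ha
          have := List.all_eq_true.mp h2 a ha
          simpa using this
        refine ⟨?_, hrun.mpr h2⟩
        push_cast at h1 ⊢
        omega
    · have hb' : b = false := by simpa using hb
      subst hb'
      simpa [posTrue, List.dropWhile_cons] using ih (n + 1) k

lemma adjChain_iff_getD : ∀ (ys : List Int) (x : Int),
    (∀ k : Nat, k + 1 < (x :: ys).length → (x :: ys).getD (k + 1) 0 = (x :: ys).getD k 0 + 1)
      ↔ AdjChain x ys := by
  intro ys
  induction ys with
  | nil => intro x; simp [AdjChain]
  | cons y t ih =>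
    intro x
    constructor
    · intro h
      refine ⟨by simpa using h 0 (by simp), ?_⟩
      exact (ih y).mp (fun k hk => by simpa using h (k + 1) (by simpa using hk))
    · rintro ⟨h1, h2⟩ k hk
      cases k with
      | zero => simpa using h1
      | succ k => simpa using (ih y).mpr h2 k (by simpa using hk)

-- A's adjacency loop, rephrased over Nat indices
lemma allcheck_iff (xs : List Int) :
    ((PySem.List.pyRange 0 (PySem.List.len xs - 1)).all
        (fun j => PySem.List.pyGetD xs (j + 1) 0 == PySem.List.pyGetD xs j 0 + 1)) = true
    ↔ (∀ k : Nat, k + 1 < xs.length → xs.getD (k + 1) 0 = xs.getD k 0 + 1) := by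
  simp only [List.all_eq_true, PySem.List.mem_pyRange_one, beq_iff_eq, PySem.List.len_eq]
  constructor
  · intro h k hk
    have hb : (0 : Int) ≤ (k : Int) ∧ (k : Int) < (xs.length : Int) - 1 := by
      constructor <;> omega
    have h2 := h (k : Int) hb
    rw [show ((k : Int) + 1) = ((k + 1 : Nat) : Int) by push_cast; ring,
      PySem.List.pyGetD_natCast, PySem.List.pyGetD_natCast] at h2
    exact h2
  · intro h j hj
    obtain ⟨hj0, hj1⟩ := hj
    lift j to Nat using hj0 with m
    have hk : m + 1 < xs.length := by omega
    have h2 := h m hk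
    rw [show ((m : Int) + 1) = ((m + 1 : Nat) : Int) by push_cast; ring,
      PySem.List.pyGetD_natCast, PySem.List.pyGetD_natCast]
    exact h2

lemma not_any_iff_all_not (l : List Bool) :
    ((!(l.any (fun b => b))) = true) ↔ (l.all (fun b => !b) = true) := by
  induction l with
  | nil => simp
  | cons a t ih => cases a <;> simp_all

-- ===== VERDICT (by name: the statement is the Claim_ definition above) =====
theorem slots_selection_is_contiguous_block_spec : Claim_equal_slots_selection_is_contiguous_block := by
  intro all selected_ids _ _
  unfold Spec_slots_selection_is_contiguous_block
  unfold slots_selection_is_contiguous_block slots_selection_is_contiguous_block_alt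
  cases hsel : selected_ids with
  | nil => simp
  | cons z zs =>
  simp only [List.isEmpty_cons, Bool.false_eq_true, if_false]
  set sel : PySem.Set Int := PySem.Set.ofList (z :: zs) with hselS
  rw [posTrue_spec sel all 0]
  set bs : List Bool := all.map (fun s => PySem.Set.contains sel ((s.lookup "id").getD 0)) with hbs
  set xs : List Int := posTrue bs 0 with hxs
  have hpw : xs.Pairwise (· < ·) := posTrue_pairwise bs 0
  have hlen : PySem.Set.len sel = (sel.length : Int) := by simp [PySem.Set.len]
  have hM := mask_main bs 0 ((sel.length : Int))
  rw [← hxs] at hM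
  have hsorted : PySem.List.sorted xs (fun x => x) = xs :=
    PySem.List.sorted_eq_self_of_pairwise _ _ (hpw.imp (fun h => le_of_lt h))
  have hchain : (((PySem.List.pyRange 0 (PySem.List.len xs - 1)).all
      (fun j => PySem.List.pyGetD xs (j + 1) 0 == PySem.List.pyGetD xs j 0 + 1)) = true)
      ↔ Chain0 xs := by
    rw [allcheck_iff]
    cases xs with
    | nil => simp [Chain0]
    | cons x ys => exact (adjChain_iff_getD ys x).trans Iff.rfl
  rw [Bool.eq_iff_iff]
  by_cases hk : ((xs.length : Int) = (sel.length : Int))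
  · rw [if_neg (by simp only [bne_iff_ne, ne_eq, PySem.List.len_eq, hlen]; omega)]
    rw [hsorted, hchain]
    simp only [Bool.and_eq_true, beq_iff_eq, PySem.List.len_eq, hlen, not_any_iff_all_not]
    constructor
    · intro h
      exact hM.mp ⟨hk, h⟩
    · intro h
      exact (hM.mpr h).2
  · rw [if_pos (by simp only [bne_iff_ne, ne_eq, PySem.List.len_eq, hlen]; omega)]
    simp only [Bool.false_eq_true, false_iff, Bool.and_eq_true, beq_iff_eq,
      PySem.List.len_eq, hlen, not_any_iff_all_not, not_and]
    intro h1 h2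
    exact hk (hM.mpr ⟨h1, h2⟩).1
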